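-- pv_equiv track=rewrite | github.com/dungba88/jenova | server/utils/learn/pre_process.py | vectorize_new_input
-- ===== SOURCE A (Python) =====
-- def vectorize_new_input(text, data_vocab):
--     """vectorize new input based on vectorized data"""
--     word_count = count_words(text)
--     vectorized_text = []
--
--     for word in data_vocab:
--         if word in word_count:
--             vectorized_text.append(word_count[word])
--         else:
--             vectorized_text.append(0)
--     return vectorized_text
--
-- def count_words(text):
--     """count words in text"""
--     word_count = {}
--     for word in text:
--         if word not in word_count:
--             word_count[word] = 1
--         else:
--             word_count[word] += 1
--     return word_count
-- ===== SOURCE B (Python) =====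
-- def vectorize_new_input(text, data_vocab):
--     """vectorize new input based on vectorized data"""
--     positions = {}
--     for i, word in enumerate(data_vocab):
--         positions.setdefault(word, []).append(i)
--     counts = {}
--     for word in text:
--         if word in positions:
--             counts[word] = counts.get(word, 0) + 1
--     vec = [0] * len(data_vocab)
--     for word, idxs in positions.items():
--         c = counts.get(word, 0)
--         for i in idxs:
--             vec[i] = c
--     return vec
-- ===== Notes on version B (the rewrite author's own statement) =====
-- stated objective: alternative
-- what changed: Replaced A's count-all-text-words-then-gather-per-vocab-word with an inverted index from each vocab word to all its positions, a counting pass restricted to indexed words, and a scatter that writes each word's count into the output vector at its positions.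
import Mathlib
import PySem

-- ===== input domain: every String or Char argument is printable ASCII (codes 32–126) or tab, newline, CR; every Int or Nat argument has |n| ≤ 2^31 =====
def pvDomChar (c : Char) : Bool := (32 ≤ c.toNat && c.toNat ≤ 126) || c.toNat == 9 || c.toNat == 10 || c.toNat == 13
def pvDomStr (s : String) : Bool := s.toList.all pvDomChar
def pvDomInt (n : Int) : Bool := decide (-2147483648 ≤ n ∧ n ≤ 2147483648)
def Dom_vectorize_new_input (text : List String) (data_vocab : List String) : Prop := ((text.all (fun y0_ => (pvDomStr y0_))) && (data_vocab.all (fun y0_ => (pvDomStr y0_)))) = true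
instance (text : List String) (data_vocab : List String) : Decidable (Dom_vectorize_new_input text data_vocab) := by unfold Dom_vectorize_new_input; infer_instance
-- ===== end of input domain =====

-- B replaces A's count-all-words-then-gather-per-vocab-word with an inverted index from vocab word
-- to its positions, counts restricted to indexed words, and a scatter of each count into the output
-- vector; return values proved equal on all inputs.

-- ===== PORT A =====
-- count_words: 'word_count[word] += 1' only runs under the membership guard, so getD _ 0 is exact
-- there (no KeyError possible).
def count_words (text : List String) : PySem.Dict String Int :=
  text.foldl
    (fun word_count word =>
      if !(word_count.contains word) then word_count.insert word 1
      else word_count.insert word (word_count.getD word 0 + 1))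
    PySem.Dict.empty

def vectorize_new_input (text : List String) (data_vocab : List String) : List Int :=
  let word_count := count_words text
  data_vocab.foldl
    (fun vectorized_text word =>
      if word_count.contains word then vectorized_text ++ [word_count.getD word 0]
      else vectorized_text ++ [0])
    []

-- ===== PORT B =====
-- positions.setdefault(word, []).append(i) ported as modify word [] (· ++ [i]) — the same dict
-- after the statement; counts.get(word, 0) is getD word 0; 'for word, idxs in positions.items()'
-- iterates items in insertion order, exactly PySem.Dict.items.
def vectorize_new_input_alt (text : List String) (data_vocab : List String) : List Int :=
  let positions : PySem.Dict String (List Int) :=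
    (PySem.List.enumerate data_vocab 0).foldl
      (fun d p => d.modify p.2 [] (fun l => l ++ [p.1])) PySem.Dict.empty
  let counts : PySem.Dict String Int :=
    text.foldl
      (fun counts word =>
        if positions.contains word then counts.insert word (counts.getD word 0 + 1)
        else counts)
      PySem.Dict.empty
  let vec := List.replicate data_vocab.length (0 : Int)
  positions.items.foldl
    (fun vec p =>
      p.2.foldl (fun v i => PySem.List.pySetD v i (counts.getD p.1 0)) vec)
    vec

-- ===== PRECONDITION & SPEC =====
def Spec_vectorize_new_input (text : List String) (data_vocab : List String) (out : List Int) : Prop := out = vectorize_new_input_alt text data_vocab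
instance (text : List String) (data_vocab : List String) (out : List Int) : Decidable (Spec_vectorize_new_input text data_vocab out) := by unfold Spec_vectorize_new_input; infer_instance

-- ===== CLAIM (what is proved, stated in full; the proofs are below) =====
def Claim_equal_vectorize_new_input : Prop := ∀ (text : List String) (data_vocab : List String), Dom_vectorize_new_input text data_vocab → Spec_vectorize_new_input text data_vocab (vectorize_new_input text data_vocab)

-- ===== LEMMAS AND PROOFS =====

-- pvIdx xs w s: the positions (offset by start s) at which w occurs in xs; what B's dict stores.
def pvIdx (xs : List String) (w : String) (s : Int) : List Int :=
  ((PySem.List.enumerate xs s).filter (fun p => p.2 == w)).map (fun p => p.1)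

theorem pvIdx_nil (w : String) (s : Int) : pvIdx [] w s = [] := rfl

theorem pvIdx_cons (x : String) (xs : List String) (w : String) (s : Int) :
    pvIdx (x :: xs) w s = (if x = w then [s] else []) ++ pvIdx xs w (s + 1) := by
  simp only [pvIdx, PySem.List.enumerate_cons, List.filter_cons]
  by_cases hx : x = w <;> simp [hx]

theorem pvIdx_mem_bounds (xs : List String) (w : String) (s i : Int) (hi : i ∈ pvIdx xs w s) :
    s ≤ i ∧ i < s + xs.length := by
  obtain ⟨p, hp, rfl⟩ := List.mem_map.mp hi
  have h1 : p ∈ PySem.List.enumerate xs s := List.mem_of_mem_filter hp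
  have h2 : p.1 ∈ (PySem.List.enumerate xs s).map (fun q => q.1) := List.mem_map_of_mem h1
  rw [PySem.List.map_fst_enumerate] at h2
  exact PySem.List.mem_pyRange_one.mp h2

theorem pvIdx_count (xs : List String) (w : String) (s : Int) (j : Nat) (hj : j < xs.length) :
    (pvIdx xs w s).count (s + (j : Int)) = if xs[j] = w then 1 else 0 := by
  induction xs generalizing s j with
  | nil => simp at hj
  | cons x xs ih =>
    rw [pvIdx_cons, List.count_append]
    cases j with
    | zero =>
      have hz : (pvIdx xs w (s + 1)).count s = 0 := by
        rw [List.count_eq_zero]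
        intro hmem
        have := (pvIdx_mem_bounds xs w (s + 1) _ hmem).1
        omega
      by_cases hx : x = w <;> simp [hx, hz]
    | succ j' =>
      have hj' : j' < xs.length := by simpa using hj
      have hs : s + ((j' + 1 : Nat) : Int) = (s + 1) + (j' : Int) := by push_cast; ring
      have hhead : (if x = w then [s] else []).count (s + ((j' + 1 : Nat) : Int)) = 0 := by
        split
        · simp [List.count_cons]; omega
        · simp
      rw [hhead, hs, ih (s + 1) j' hj']
      simp

theorem pvIdx_mem_iff (xs : List String) (w : String) (j : Nat) (hj : j < xs.length) :
    ((j : Int) ∈ pvIdx xs w 0) ↔ xs[j] = w := by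
  have h := pvIdx_count xs w 0 j hj
  simp only [zero_add] at h
  constructor
  · intro hm
    by_contra hne
    rw [if_neg hne] at h
    have := List.count_pos_iff.mpr hm
    omega
  · intro he
    rw [if_pos he] at h
    have : 0 < List.count ((j : Int)) (pvIdx xs w 0) := by omega
    exact List.count_pos_iff.mp this

-- the position dict B builds, characterised: each word maps to its list of vocab positions
theorem positions_getD (xs : List String) (s : Int) (d : PySem.Dict String (List Int))
    (w : String) :
    ((PySem.List.enumerate xs s).foldl
        (fun d p => d.modify p.2 [] (fun l => l ++ [p.1])) d).getD w []
      = d.getD w [] ++ pvIdx xs w s := by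
  induction xs generalizing s d with
  | nil => simp [pvIdx_nil, PySem.List.enumerate]
  | cons x xs ih =>
    rw [PySem.List.enumerate_cons]
    simp only [List.foldl_cons]
    rw [ih, pvIdx_cons]
    by_cases hx : x = w
    · subst hx
      rw [PySem.Dict.getD_modify_self]
      simp
    · rw [PySem.Dict.getD_modify_of_ne d [] _ (fun h => hx h.symm)]
      simp [hx]

theorem positions_contains (xs : List String) (s : Int) (d : PySem.Dict String (List Int))
    (w : String) :
    (((PySem.List.enumerate xs s).foldl
        (fun d p => d.modify p.2 [] (fun l => l ++ [p.1])) d).contains w = true)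
      ↔ (w ∈ xs ∨ d.contains w = true) := by
  induction xs generalizing s d with
  | nil => simp [PySem.List.enumerate]
  | cons x xs ih =>
    rw [PySem.List.enumerate_cons]
    simp only [List.foldl_cons]
    rw [ih]
    simp only [PySem.Dict.contains_modify, Bool.or_eq_true, beq_iff_eq, List.mem_cons]
    tauto

theorem positions_keys_nodup (xs : List String) (s : Int) (d : PySem.Dict String (List Int))
    (hd : d.keys.Nodup) :
    (((PySem.List.enumerate xs s).foldl
        (fun d p => d.modify p.2 [] (fun l => l ++ [p.1])) d).keys).Nodup := by
  induction xs generalizing s d with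
  | nil => simpa [PySem.List.enumerate]
  | cons x xs ih =>
    rw [PySem.List.enumerate_cons]
    simp only [List.foldl_cons]
    apply ih
    rw [PySem.Dict.keys_modify]
    by_cases h : d.contains x
    · rwa [PySem.Dict.keys_insert_of_contains d _ h]
    · rw [PySem.Dict.keys_insert_of_not_contains d _ (by simpa using h)]
      refine List.Nodup.append hd (List.nodup_singleton x) ?_
      intro a ha hb
      simp only [List.mem_singleton] at hb
      subst hb
      exact absurd ((PySem.Dict.contains_iff_mem_keys d a).mpr ha) (by simpa using h)

-- the counts dict B builds: per word, its count in text (for indexed words)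
theorem counts_getD (P : PySem.Dict String (List Int)) (ts : List String)
    (c : PySem.Dict String Int) (w : String) :
    (ts.foldl
        (fun counts word =>
          if P.contains word then counts.insert word (counts.getD word 0 + 1) else counts)
        c).getD w 0
      = c.getD w 0 + if P.contains w then (ts.count w : Int) else 0 := by
  induction ts generalizing c with
  | nil => simp
  | cons t ts ih =>
    simp only [List.foldl_cons]
    by_cases hp : P.contains t
    · rw [if_pos hp, ih]
      by_cases hw : w = t
      · subst hw
        rw [PySem.Dict.getD_insert_self, if_pos hp, if_pos hp, List.count_cons]
        simp
        ring
      · rw [PySem.Dict.getD_insert_of_ne _ _ _ hw, List.count_cons]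
        have : (t == w) = false := by simpa using fun h => hw h.symm
        simp [this]
    · rw [if_neg hp, ih, List.count_cons]
      by_cases hw : w = t
      · subst hw
        simp [hp]
      · have : (t == w) = false := by simpa using fun h => hw h.symm
        simp [this]

-- the inner 'vec[i] = c' loop of the scatter
theorem setAll_length (is : List Int) (v : List Int) (c : Int) :
    (is.foldl (fun v i => PySem.List.pySetD v i c) v).length = v.length := by
  induction is generalizing v with
  | nil => rfl
  | cons i is ih => simp [ih, PySem.List.length_pySetD]

theorem setAll_getD (is : List Int) (v : List Int) (c : Int)
    (hb : ∀ i ∈ is, 0 ≤ i ∧ i < (v.length : Int)) (j : Nat) :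
    (is.foldl (fun v i => PySem.List.pySetD v i c) v).getD j 0
      = if (j : Int) ∈ is then c else v.getD j 0 := by
  induction is generalizing v with
  | nil => simp
  | cons i is ih =>
    obtain ⟨h0, h1⟩ := hb i List.mem_cons_self
    simp only [List.foldl_cons]
    rw [PySem.List.pySetD_of_nonneg v _ h0]
    rw [ih (v.set i.toNat c) (by intro x hx; simpa using hb x (List.mem_cons_of_mem i hx))]
    have hlen : i.toNat < v.length := by omega
    by_cases hm : (j : Int) ∈ is
    · simp [hm]
    · by_cases he : i.toNat = j
      · have hmem' : (j : Int) ∈ i :: is := by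
          have : i = (j : Int) := by omega
          rw [this]; exact List.mem_cons_self
        rw [if_pos hmem']
        simp only [List.getD, List.getElem?_set, he]
        simp [show j < v.length from he ▸ hlen]
      · have hij : ¬ (i = (j : Int)) := by omega
        have hmem' : ¬ ((j : Int) ∈ i :: is) := by
          intro h
          rcases List.mem_cons.mp h with h | h
          · exact hij h.symm
          · exact hm h
        rw [if_neg hmem']
        simp [List.getD, he, hm]

-- the outer scatter: groups with key w0 write B's count for w0 at j; others never touch j
theorem scatter_length (C : PySem.Dict String Int) (gs : List (String × List Int))
    (v : List Int) :
    (gs.foldl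
        (fun vec p => p.2.foldl (fun v i => PySem.List.pySetD v i (C.getD p.1 0)) vec)
        v).length = v.length := by
  induction gs generalizing v with
  | nil => rfl
  | cons g gs ih => simp [ih, setAll_length]

theorem scatter_getD (C : PySem.Dict String Int) (w0 : String)
    (gs : List (String × List Int)) (v : List Int) (j : Nat)
    (hb : ∀ g ∈ gs, ∀ i ∈ g.2, 0 ≤ i ∧ i < (v.length : Int))
    (hmem : ∀ g ∈ gs, ((j : Int) ∈ g.2 ↔ g.1 = w0)) :
    (gs.foldl
        (fun vec p => p.2.foldl (fun v i => PySem.List.pySetD v i (C.getD p.1 0)) vec)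
        v).getD j 0
      = if gs.any (fun g => g.1 == w0) then C.getD w0 0 else v.getD j 0 := by
  induction gs generalizing v with
  | nil => simp
  | cons g gs ih =>
    simp only [List.foldl_cons]
    rw [ih (g.2.foldl (fun v i => PySem.List.pySetD v i (C.getD g.1 0)) v)
        (by intro g' hg' i hi
            have := hb g' (List.mem_cons_of_mem g hg') i hi
            rw [setAll_length]
            exact this)
        (fun g' hg' => hmem g' (List.mem_cons_of_mem g hg'))]
    rw [setAll_getD g.2 v (C.getD g.1 0) (hb g List.mem_cons_self) j]
    have hiff := hmem g List.mem_cons_self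
    by_cases hg : g.1 = w0
    · have hj2 : (j : Int) ∈ g.2 := hiff.mpr hg
      by_cases ha : gs.any (fun g => g.1 == w0)
      · simp [ha]
      · simp [ha, hg, hj2]
    · have hj2 : ¬ ((j : Int) ∈ g.2) := fun h => hg (hiff.mp h)
      by_cases ha : gs.any (fun g => g.1 == w0)
      · simp [ha]
      · simp [ha, hg, hj2]

-- A's counting loop is exactly the Counter fold: in the not-yet-present branch getD is 0.
theorem count_words_eq_counter (text : List String) :
    count_words text = PySem.Dict.counter text := by
  unfold count_words
  rw [← PySem.Dict.foldl_insert_getD_add_one_eq_counter]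
  apply PySem.List.foldl_congr_mem
  intro d w _
  by_cases h : d.contains w
  · simp [h]
  · simp only [Bool.not_eq_true] at h
    simp [h, PySem.Dict.getD_of_not_contains d 0 h]

-- A in normal form: the per-vocab-word counts of text
theorem vectorize_new_input_norm (text : List String) (data_vocab : List String) :
    vectorize_new_input text data_vocab
      = data_vocab.map (fun w => (List.count w text : Int)) := by
  unfold vectorize_new_input
  simp only [count_words_eq_counter]
  calc data_vocab.foldl
        (fun acc w => if (PySem.Dict.counter text).contains w then
            acc ++ [(PySem.Dict.counter text).getD w 0] else acc ++ [(0 : Int)]) []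
      = data_vocab.foldl (fun acc w => acc ++ [(List.count w text : Int)]) [] := by
        apply PySem.List.foldl_congr_mem
        intro acc w _
        by_cases hc : w ∈ text
        · simp [PySem.Dict.contains_counter, hc, PySem.Dict.getD_counter]
        · simp [PySem.Dict.contains_counter, hc, List.count_eq_zero.mpr hc]
    _ = data_vocab.map (fun w => (List.count w text : Int)) := by
        simpa using PySem.List.foldl_append_singleton_eq_map
          (fun w => (List.count w text : Int)) data_vocab []

-- B in the same normal form
theorem vectorize_new_input_alt_norm (text : List String) (data_vocab : List String) :
    vectorize_new_input_alt text data_vocab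
      = data_vocab.map (fun w => (List.count w text : Int)) := by
  unfold vectorize_new_input_alt
  simp only
  set P : PySem.Dict String (List Int) :=
    (PySem.List.enumerate data_vocab 0).foldl
      (fun d p => d.modify p.2 [] (fun l => l ++ [p.1])) PySem.Dict.empty with hP
  set C : PySem.Dict String Int :=
    text.foldl
      (fun counts word =>
        if P.contains word then counts.insert word (counts.getD word 0 + 1) else counts)
      PySem.Dict.empty with hC
  have hnodup : P.keys.Nodup := by
    rw [hP]
    exact positions_keys_nodup data_vocab 0 PySem.Dict.empty (by simp [PySem.Dict.empty])
  have hgetD : ∀ w, P.getD w [] = pvIdx data_vocab w 0 := by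
    intro w
    rw [hP, positions_getD]
    simp
  have hcont : ∀ w, (P.contains w = true) ↔ w ∈ data_vocab := by
    intro w
    rw [hP, positions_contains]
    simp [PySem.Dict.empty, PySem.Dict.contains]
  have hitems : P.items = P.keys.map (fun k => (k, pvIdx data_vocab k 0)) := by
    rw [PySem.Dict.items_eq_map_keys P hnodup []]
    exact List.map_congr_left (fun k _ => by rw [hgetD k])
  rw [hitems]
  apply List.ext_getElem
  · rw [scatter_length]
    simp
  · intro j h1 h2
    have hj : j < data_vocab.length := by simpa using h2
    have hlenr : (List.replicate data_vocab.length (0 : Int)).length = data_vocab.length := by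
      simp
    have hb : ∀ g ∈ P.keys.map (fun k => (k, pvIdx data_vocab k 0)), ∀ i ∈ g.2,
        0 ≤ i ∧ i < ((List.replicate data_vocab.length (0 : Int)).length : Int) := by
      intro g hg i hi
      obtain ⟨k, _, rfl⟩ := List.mem_map.mp hg
      have := pvIdx_mem_bounds data_vocab k 0 i hi
      rw [hlenr]
      omega
    have hmem : ∀ g ∈ P.keys.map (fun k => (k, pvIdx data_vocab k 0)),
        ((j : Int) ∈ g.2 ↔ g.1 = data_vocab[j]'hj) := by
      intro g hg
      obtain ⟨k, _, rfl⟩ := List.mem_map.mp hg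
      rw [pvIdx_mem_iff data_vocab k j hj]
      exact eq_comm
    have hany : (P.keys.map (fun k => (k, pvIdx data_vocab k 0))).any
        (fun g => g.1 == data_vocab[j]'hj) = true := by
      rw [List.any_eq_true]
      refine ⟨(data_vocab[j]'hj, pvIdx data_vocab (data_vocab[j]'hj) 0), ?_, by simp⟩
      apply List.mem_map_of_mem
      exact (PySem.Dict.contains_iff_mem_keys P _).mp
        ((hcont _).mpr (List.getElem_mem hj))
    have hval := scatter_getD C (data_vocab[j]'hj)
      (P.keys.map (fun k => (k, pvIdx data_vocab k 0)))
      (List.replicate data_vocab.length (0 : Int)) j hb hmem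
    rw [hany, if_pos rfl] at hval
    have hC0 : C.getD (data_vocab[j]'hj) 0 = (List.count (data_vocab[j]'hj) text : Int) := by
      rw [hC, counts_getD, if_pos ((hcont _).mpr (List.getElem_mem hj)),
        PySem.Dict.getD_empty]
      ring
    rw [hC0] at hval
    rw [List.getD_eq_getElem?_getD, List.getElem?_eq_getElem h1] at hval
    simp only [Option.getD_some] at hval
    rw [hval]
    simp

theorem vectorize_new_input_spec : Claim_equal_vectorize_new_input := by
  intro text data_vocab _
  unfold Spec_vectorize_new_input
  rw [vectorize_new_input_norm, vectorize_new_input_alt_norm]
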